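-- pv_equiv track=rewrite | github.com/brianlan/quiz | LeetCode/leetcode_21_generate_parentheses.py | remove_invalid
-- ===== SOURCE A (Python) =====
-- def remove_invalid(candidates):
--     final = []
--     for s in candidates:
--         stack = []
--         try:
--             for i in range(len(s)):
--                 if s[i] == '(':
--                     stack.append(1)
--                 else:
--                     stack.pop()
--         except IndexError:
--             pass
--         else:
--             final.append(s)
--     return final
-- ===== SOURCE B (Python) =====
-- def remove_invalid(candidates):
--     def ok(s):
--         # kept iff every prefix has at least as many '(' as other characters
--         return all(2 * s[:i].count('(') >= i for i in range(1, len(s) + 1))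
--     return [s for s in candidates if ok(s)]
-- ===== Notes on version B (the rewrite author's own statement) =====
-- stated objective: alternative
-- what changed: Replaces A's single stateful scan (a stack mutated per character with try/except control flow) by a stateless prefix test: a string is kept iff every prefix of length i contains at least as many '(' as other characters, checked as all(2*s[:i].count('(') >= i) over staged counting passes.
import Mathlib
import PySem

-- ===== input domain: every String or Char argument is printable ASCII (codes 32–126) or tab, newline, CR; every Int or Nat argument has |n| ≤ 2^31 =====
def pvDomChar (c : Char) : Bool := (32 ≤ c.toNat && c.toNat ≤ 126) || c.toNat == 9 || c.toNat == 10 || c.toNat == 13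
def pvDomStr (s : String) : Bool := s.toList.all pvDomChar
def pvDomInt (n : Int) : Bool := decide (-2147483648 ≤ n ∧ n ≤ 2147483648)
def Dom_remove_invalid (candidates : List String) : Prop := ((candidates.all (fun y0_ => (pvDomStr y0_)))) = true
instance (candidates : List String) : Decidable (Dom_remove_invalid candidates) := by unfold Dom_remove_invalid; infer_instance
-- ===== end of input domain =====

-- B replaces A's stateful stack simulation (with try/except) by a stateless prefix test:
-- a string is kept iff every prefix of length i contains at least i/2 '(' characters
-- (i.e. at least as many '(' as other characters) — staged counting passes instead of
-- a single stateful scan (alternative decomposition; same result, quadratic per string).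

-- ===== PORT A =====
-- inner loop of A: walk the characters keeping the stack; `none` = the IndexError branch was taken
def pvALoop : List Char → List Int → Option (List Int)
  | [], st => some st
  | c :: rest, st =>
    if c = '(' then pvALoop rest (st ++ [1])
    else match st with
      | [] => none            -- stack.pop() on empty list raises IndexError
      | _ => pvALoop rest st.dropLast

def remove_invalid (candidates : List String) : List String :=
  candidates.foldl (fun final s =>
    match pvALoop s.toList [] with
    | some _ => final ++ [s]
    | none => final) []

-- ===== PORT B =====
-- ok(s): all(2 * s[:i].count('(') >= i for i in range(1, len(s) + 1))
def pvOk (s : List Char) : Bool :=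
  (PySem.List.pyRange 1 ((s.length : Int) + 1) 1).all
    (fun i => decide ((i : Int) ≤ 2 * ((PySem.List.slice s none (some i)).count '(' : Int)))

def remove_invalid_alt (candidates : List String) : List String :=
  candidates.filter (fun s => pvOk s.toList)

-- ===== PRECONDITION & SPEC =====
def Spec_remove_invalid (candidates : List String) (out : List String) : Prop := out = remove_invalid_alt candidates
instance (candidates : List String) (out : List String) : Decidable (Spec_remove_invalid candidates out) := by unfold Spec_remove_invalid; infer_instance

-- ===== CLAIM (what is proved, stated in full; the proofs are below) =====
def Claim_equal_remove_invalid : Prop := ∀ (candidates : List String), Dom_remove_invalid candidates → Spec_remove_invalid candidates (remove_invalid candidates)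

-- ===== LEMMAS AND PROOFS =====

-- common characterization: every nonempty prefix has at least as many '(' as other characters
def pvGood (s : List Char) : Prop :=
  ∀ i : Nat, 1 ≤ i → i ≤ s.length → (i : Int) ≤ 2 * ((s.take i).count '(')

-- A's inner loop succeeds iff every prefix height (stack size) stays nonnegative
theorem pvALoop_iff (chars : List Char) : ∀ st : List Int,
    (pvALoop chars st).isSome = true ↔
    ∀ i : Nat, 1 ≤ i → i ≤ chars.length →
      (i : Int) ≤ (st.length : Int) + 2 * ((chars.take i).count '(') := by
  induction chars with
  | nil =>
    intro st
    constructor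
    · intro _ i h1 h2; simp at h2; omega
    · intro _; rfl
  | cons c rest ih =>
    intro st
    by_cases hc : c = '('
    · subst hc
      rw [show pvALoop ('(' :: rest) st = pvALoop rest (st ++ [1]) by simp [pvALoop]]
      rw [ih]
      constructor
      · intro h i h1 h2
        cases i with
        | zero => omega
        | succ j =>
          simp only [List.take_succ_cons, List.count_cons, beq_self_eq_true, if_true]
          cases Nat.eq_zero_or_pos j with
          | inl hz => subst hz; simp; omega
          | inr hj =>
            have := h j hj (by simpa using h2)
            simp only [List.length_append, List.length_cons, List.length_nil] at this
            push_cast at this ⊢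
            omega
      · intro h j h1 h2
        have := h (j + 1) (by omega) (by simp; omega)
        simp only [List.take_succ_cons, List.count_cons, beq_self_eq_true, if_true] at this
        simp only [List.length_append, List.length_cons]
        push_cast at this ⊢
        omega
    · have hbeq : (c == '(') = false := by simp [hc]
      cases st with
      | nil =>
        simp only [pvALoop, if_neg hc, Option.isSome_none]
        constructor
        · intro h; exact absurd h (by simp)
        · intro h
          have := h 1 (by omega) (by simp)
          simp [List.take_succ_cons, List.count_cons, hbeq] at this
      | cons x t =>
        simp only [pvALoop, if_neg hc]
        rw [ih]
        have hdl : (x :: t).dropLast.length = t.length := by simp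
        constructor
        · intro h i h1 h2
          cases i with
          | zero => omega
          | succ j =>
            cases Nat.eq_zero_or_pos j with
            | inl hz => subst hz; simp; omega
            | inr hj =>
              simp only [List.take_succ_cons, List.count_cons, hbeq, Bool.false_eq_true,
                if_false]
              have := h j hj (by simpa using h2)
              rw [hdl] at this
              simp only [List.length_cons]
              push_cast at this ⊢
              omega
        · intro h j h1 h2
          have := h (j + 1) (by omega) (by simp; omega)
          simp only [List.take_succ_cons, List.count_cons, hbeq, Bool.false_eq_true, if_false,
            List.length_cons] at this
          rw [hdl]
          push_cast at this ⊢
          omega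

theorem pvOk_iff (s : List Char) : pvOk s = true ↔ pvGood s := by
  unfold pvOk pvGood
  rw [List.all_eq_true]
  constructor
  · intro h i h1 h2
    have hm : (i : Int) ∈ PySem.List.pyRange 1 ((s.length : Int) + 1) 1 := by
      rw [PySem.List.mem_pyRange_one]; omega
    have := h _ hm
    rw [decide_eq_true_eq, PySem.List.slice_to_natCast s i] at this
    simpa using this
  · intro h x hx
    rw [PySem.List.mem_pyRange_one] at hx
    have hx' : x = ((x.toNat : Nat) : Int) := by omega
    rw [decide_eq_true_eq, hx', PySem.List.slice_to_natCast s x.toNat]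
    exact h x.toNat (by omega) (by omega)

theorem pvALoop_eq_pvOk (s : List Char) : (pvALoop s []).isSome = pvOk s := by
  have h1 := pvALoop_iff s []
  have h2 := pvOk_iff s
  simp only [List.length_nil, Int.natCast_zero, zero_add] at h1
  rw [Bool.eq_iff_iff, h1, h2]
  rfl

theorem foldl_filter (candidates : List String) : ∀ acc : List String,
    candidates.foldl (fun final s =>
      match pvALoop s.toList [] with
      | some _ => final ++ [s]
      | none => final) acc = acc ++ candidates.filter (fun s => pvOk s.toList) := by
  induction candidates with
  | nil => intro acc; simp
  | cons s rest ih =>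
    intro acc
    have h := pvALoop_eq_pvOk s.toList
    cases hA : pvALoop s.toList [] with
    | some st =>
      have hb : pvOk s.toList = true := by rw [← h, hA]; rfl
      simp [List.foldl_cons, hA, hb, ih]
    | none =>
      have hb : pvOk s.toList = false := by rw [← h, hA]; rfl
      simp [List.foldl_cons, hA, hb, ih]

-- ===== VERDICT (by name: the statement is the Claim_ definition above) =====
theorem remove_invalid_spec : Claim_equal_remove_invalid := by
  intro candidates _
  unfold Spec_remove_invalid remove_invalid remove_invalid_alt
  simpa using foldl_filter candidates []
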